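-- pv_equiv track=rewrite | github.com/publik-void/sensor-logging | script/write-sensors-include.py | snippet_aggregation_step
-- ===== SOURCE A (Python) =====
-- import textwrap
--
-- def indent(str, n = 1):
--   return textwrap.indent(str, "  " * n)
--
-- def snippet_aggregation_step(sensor_name, sensor_params):
--   str = f'auto aggregation_step(\n'
--   str += indent(f'{sensor_name} const aggregate,\n', 2)
--   str += indent(f'{sensor_name}_state const state,\n', 2)
--   str += indent(f'{sensor_name} const sample) {{\n', 2)
--   for field_name, field_params in sensor_params.items():
--     str += indent(f'auto const {field_name}{{optional_apply('
--       f'aggregation_step_{field_params["aggregate"]},\n')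
--     str += indent(f'aggregate.{field_name}, sample.{field_name})}};\n', 2)
--     if field_params["aggregate"] in ["mean"]:
--       str += indent(
--         f'auto const {field_name}_count{{state.{field_name}_count + \n')
--       str += indent(f'(sample.{field_name}.has_value() ? 1u : 0u)}};\n', 2)
--
--   str += indent(
--     f'\nreturn std::pair<{sensor_name}, {sensor_name}_state>{{{{\n')
--   str += indent(f'{{}},\n', 3)
--   for field_name, field_params in sensor_params.items():
--     str += indent(f'{field_name},\n', 3)
--   str += indent(f'}}, {{\n', 2)
--   str += indent(f'{{}},\n', 3)
--   for field_name, field_params in sensor_params.items():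
--     if field_params["aggregate"] in ["mean"]:
--       str += indent(f'{field_name}_count,\n', 3)
--   str += indent(f'}}\n', 2)
--   str += indent(f'}};\n')
--   return str + f'}}\n'
-- ===== SOURCE B (Python) =====
-- import textwrap
--
-- def snippet_aggregation_step(sensor_name, sensor_params):
--   decls, fields, counts = [], [], []
--   for field_name, field_params in sensor_params.items():
--     agg = field_params["aggregate"]
--     d = textwrap.indent(
--       f'auto const {field_name}{{optional_apply(aggregation_step_{agg},\n', '  ')
--     d += textwrap.indent(
--       f'aggregate.{field_name}, sample.{field_name})}};\n', '    ')
--     if agg == "mean":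
--       d += textwrap.indent(
--         f'auto const {field_name}_count{{state.{field_name}_count + \n', '  ')
--       d += textwrap.indent(
--         f'(sample.{field_name}.has_value() ? 1u : 0u)}};\n', '    ')
--     decls.append(d)
--     fields.append(textwrap.indent(f'{field_name},\n', '      '))
--     if agg == "mean":
--       counts.append(textwrap.indent(f'{field_name}_count,\n', '      '))
--   header = (
--     'auto aggregation_step(\n'
--     + textwrap.indent(f'{sensor_name} const aggregate,\n', '    ')
--     + textwrap.indent(f'{sensor_name}_state const state,\n', '    ')
--     + textwrap.indent(f'{sensor_name} const sample) {{\n', '    '))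
--   ret = (
--     textwrap.indent(f'\nreturn std::pair<{sensor_name}, {sensor_name}_state>{{{{\n', '  ')
--     + textwrap.indent('{},\n', '      ')
--     + ''.join(fields)
--     + textwrap.indent('}, {\n', '    ')
--     + textwrap.indent('{},\n', '      ')
--     + ''.join(counts)
--     + textwrap.indent('}\n', '    ')
--     + textwrap.indent('};\n', '  '))
--   return header + ''.join(decls) + ret + '}\n'
-- ===== Notes on version B (the rewrite author's own statement) =====
-- stated objective: alternative
-- what changed: A scans sensor_params three separate times, interleaving string += into one growing buffer; B scans it once, filling three section lists (declarations, field names, mean-count names) that are joined and concatenated with the fixed header/return/footer afterwards.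
import Mathlib
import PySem

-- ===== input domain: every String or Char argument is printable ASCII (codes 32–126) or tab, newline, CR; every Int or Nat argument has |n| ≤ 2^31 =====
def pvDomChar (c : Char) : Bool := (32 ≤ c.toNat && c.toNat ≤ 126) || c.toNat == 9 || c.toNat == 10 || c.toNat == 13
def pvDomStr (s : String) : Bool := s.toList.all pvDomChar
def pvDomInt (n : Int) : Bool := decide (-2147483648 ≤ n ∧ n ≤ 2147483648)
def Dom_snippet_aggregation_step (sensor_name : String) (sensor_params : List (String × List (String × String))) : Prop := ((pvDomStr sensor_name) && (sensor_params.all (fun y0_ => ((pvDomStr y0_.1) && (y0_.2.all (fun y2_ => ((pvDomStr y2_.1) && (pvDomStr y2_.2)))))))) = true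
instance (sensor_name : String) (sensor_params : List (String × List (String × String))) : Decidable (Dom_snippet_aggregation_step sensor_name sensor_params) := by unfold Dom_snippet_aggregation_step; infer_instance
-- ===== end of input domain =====

-- B replaces A's three separate scans of sensor_params with one scan filling three
-- section buffers that are joined afterwards (objective: alternative decomposition; same cost).

-- ===== PORT A =====
-- Shared helper: port of textwrap.indent (both Pythons call it).  Exact on the stated
-- domain (printable ASCII + tab/newline/CR): there the Python line breaks recognised by
-- str.splitlines are '\n', '\r', '\r\n', and str.strip() whitespace is ' ' '\t' '\n' '\r'.
def pvIsWs (c : Char) : Bool := c = ' ' || c = '\t' || c = '\n' || c = '\r'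

-- s.splitlines(keepends=True), hand-ported (exactness domain as above)
def pvSplitKeep : List Char → List Char → List (List Char)
  | cur, [] => if cur.isEmpty then [] else [cur.reverse]
  | cur, '\n' :: rest => (cur.reverse ++ ['\n']) :: pvSplitKeep [] rest
  | cur, '\r' :: '\n' :: rest => (cur.reverse ++ ['\r', '\n']) :: pvSplitKeep [] rest
  | cur, '\r' :: rest => (cur.reverse ++ ['\r']) :: pvSplitKeep [] rest
  | cur, c :: rest => pvSplitKeep (c :: cur) rest

-- textwrap.indent(s, pre): prefix every line whose strip() is non-empty
def pvTW (s : String) (pre : String) : String :=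
  String.ofList
    (((pvSplitKeep [] s.toList).map
      (fun l => if l.any (fun c => !pvIsWs c) then pre.toList ++ l else l)).flatten)

-- Python "  " * n
def pvRepeat (s : String) (n : Nat) : String :=
  String.ofList (List.flatten (List.replicate n s.toList))

-- the module helper 'indent(str, n = 1)' of A's file
def pvIndentN (s : String) (n : Nat) : String := pvTW s (pvRepeat "  " n)

def snippet_aggregation_step (sensor_name : String) (sensor_params : List (String × List (String × String))) : String :=
  let s := "auto aggregation_step(\n"
  let s := s ++ pvIndentN (sensor_name ++ " const aggregate,\n") 2
  let s := s ++ pvIndentN (sensor_name ++ "_state const state,\n") 2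
  let s := s ++ pvIndentN (sensor_name ++ " const sample) {\n") 2
  let s := (PySem.Dict.ofList sensor_params).items.foldl (fun s p =>
    let agg := (PySem.Dict.ofList p.2).getD "aggregate" ""   -- KeyError excluded by Pre_
    let s := s ++ pvIndentN ("auto const " ++ p.1 ++ "{optional_apply(aggregation_step_" ++ agg ++ ",\n") 1
    let s := s ++ pvIndentN ("aggregate." ++ p.1 ++ ", sample." ++ p.1 ++ ")};\n") 2
    if agg = "mean" then
      s ++ pvIndentN ("auto const " ++ p.1 ++ "_count{state." ++ p.1 ++ "_count + \n") 1
        ++ pvIndentN ("(sample." ++ p.1 ++ ".has_value() ? 1u : 0u)};\n") 2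
    else s) s
  let s := s ++ pvIndentN ("\nreturn std::pair<" ++ sensor_name ++ ", " ++ sensor_name ++ "_state>{{\n") 1
  let s := s ++ pvIndentN "{},\n" 3
  let s := (PySem.Dict.ofList sensor_params).items.foldl (fun s p => s ++ pvIndentN (p.1 ++ ",\n") 3) s
  let s := s ++ pvIndentN "}, {\n" 2
  let s := s ++ pvIndentN "{},\n" 3
  let s := (PySem.Dict.ofList sensor_params).items.foldl (fun s p =>
    if (PySem.Dict.ofList p.2).getD "aggregate" "" = "mean" then s ++ pvIndentN (p.1 ++ "_count,\n") 3
    else s) s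
  let s := s ++ pvIndentN "}\n" 2
  let s := s ++ pvIndentN "};\n" 1
  s ++ "}\n"

-- ===== PORT B =====
def snippet_aggregation_step_alt (sensor_name : String) (sensor_params : List (String × List (String × String))) : String :=
  let acc := (PySem.Dict.ofList sensor_params).items.foldl
    (fun (acc : List String × List String × List String) p =>
      let agg := (PySem.Dict.ofList p.2).getD "aggregate" ""   -- KeyError excluded by Pre_
      let d := pvTW ("auto const " ++ p.1 ++ "{optional_apply(aggregation_step_" ++ agg ++ ",\n") "  "
      let d := d ++ pvTW ("aggregate." ++ p.1 ++ ", sample." ++ p.1 ++ ")};\n") "    "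
      let d := if agg = "mean" then
          d ++ pvTW ("auto const " ++ p.1 ++ "_count{state." ++ p.1 ++ "_count + \n") "  "
            ++ pvTW ("(sample." ++ p.1 ++ ".has_value() ? 1u : 0u)};\n") "    "
        else d
      (acc.1 ++ [d],
       acc.2.1 ++ [pvTW (p.1 ++ ",\n") "      "],
       if agg = "mean" then acc.2.2 ++ [pvTW (p.1 ++ "_count,\n") "      "] else acc.2.2))
    ([], [], [])
  let header := "auto aggregation_step(\n"
    ++ pvTW (sensor_name ++ " const aggregate,\n") "    "
    ++ pvTW (sensor_name ++ "_state const state,\n") "    "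
    ++ pvTW (sensor_name ++ " const sample) {\n") "    "
  let ret := pvTW ("\nreturn std::pair<" ++ sensor_name ++ ", " ++ sensor_name ++ "_state>{{\n") "  "
    ++ pvTW "{},\n" "      "
    ++ PySem.Str.join "" acc.2.1
    ++ pvTW "}, {\n" "    "
    ++ pvTW "{},\n" "      "
    ++ PySem.Str.join "" acc.2.2
    ++ pvTW "}\n" "    "
    ++ pvTW "};\n" "  "
  header ++ PySem.Str.join "" acc.1 ++ ret ++ "}\n"

-- ===== PRECONDITION & SPEC =====
-- Pre_ excludes exactly the inputs on which A raises KeyError: a field whose params dict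
-- has no "aggregate" key (B raises there too).
def Pre_snippet_aggregation_step (sensor_name : String) (sensor_params : List (String × List (String × String))) : Prop :=
  ∀ p ∈ (PySem.Dict.ofList sensor_params).items, "aggregate" ∈ p.2.map Prod.fst
instance (sensor_name : String) (sensor_params : List (String × List (String × String))) : Decidable (Pre_snippet_aggregation_step sensor_name sensor_params) := by unfold Pre_snippet_aggregation_step; infer_instance

def pvWitness_snippet_aggregation_step : String × (List (String × List (String × String))) :=
  ("mpu9250", [("accel", [("aggregate", "mean")]), ("temp", [("aggregate", "max")])])

def Spec_snippet_aggregation_step (sensor_name : String) (sensor_params : List (String × List (String × String))) (out : String) : Prop := out = snippet_aggregation_step_alt sensor_name sensor_params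
instance (sensor_name : String) (sensor_params : List (String × List (String × String))) (out : String) : Decidable (Spec_snippet_aggregation_step sensor_name sensor_params out) := by unfold Spec_snippet_aggregation_step; infer_instance

-- ===== CLAIM (what is proved, stated in full; the proofs are below) =====
def Claim_equal_snippet_aggregation_step : Prop := ∀ (sensor_name : String) (sensor_params : List (String × List (String × String))), Dom_snippet_aggregation_step sensor_name sensor_params → Pre_snippet_aggregation_step sensor_name sensor_params → Spec_snippet_aggregation_step sensor_name sensor_params (snippet_aggregation_step sensor_name sensor_params)

-- ===== LEMMAS AND PROOFS =====

-- join with the empty separator, structurally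
theorem pvSJ_nil : PySem.Str.join "" [] = "" := by
  simp [PySem.Str.join, PySem.Chars.join]
  rfl

theorem pvSJ_cons (x : String) (xs : List String) :
    PySem.Str.join "" (x :: xs) = x ++ PySem.Str.join "" xs := by
  cases xs with
  | nil => simp [PySem.Str.join, PySem.Chars.join_singleton]
  | cons y ys => simp [PySem.Str.join, PySem.Chars.join_cons_cons, String.ofList_append]

-- the per-field text chunks both programs emit
def pvAgg (p : String × List (String × String)) : String :=
  (PySem.Dict.ofList p.2).getD "aggregate" ""

def pvDchunk (p : String × List (String × String)) : String :=
  let d := pvTW ("auto const " ++ p.1 ++ "{optional_apply(aggregation_step_" ++ pvAgg p ++ ",\n") "  "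
  let d := d ++ pvTW ("aggregate." ++ p.1 ++ ", sample." ++ p.1 ++ ")};\n") "    "
  if pvAgg p = "mean" then
    d ++ pvTW ("auto const " ++ p.1 ++ "_count{state." ++ p.1 ++ "_count + \n") "  "
      ++ pvTW ("(sample." ++ p.1 ++ ".has_value() ? 1u : 0u)};\n") "    "
  else d

def pvFchunk (p : String × List (String × String)) : String := pvTW (p.1 ++ ",\n") "      "

def pvCchunk (p : String × List (String × String)) : String := pvTW (p.1 ++ "_count,\n") "      "

-- the module helper at the indent levels A uses is textwrap.indent with a literal prefix
theorem pvIndentN_one (s : String) : pvIndentN s 1 = pvTW s "  " := by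
  have h : pvRepeat "  " 1 = "  " := by decide
  rw [pvIndentN, h]

theorem pvIndentN_two (s : String) : pvIndentN s 2 = pvTW s "    " := by
  have h : pvRepeat "  " 2 = "    " := by decide
  rw [pvIndentN, h]

theorem pvIndentN_three (s : String) : pvIndentN s 3 = pvTW s "      " := by
  have h : pvRepeat "  " 3 = "      " := by decide
  rw [pvIndentN, h]

-- A's first loop accumulates exactly the joined declaration chunks
theorem pvA_loop1 (ps : List (String × List (String × String))) (s0 : String) :
    ps.foldl (fun s p =>
      let agg := (PySem.Dict.ofList p.2).getD "aggregate" ""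
      let s := s ++ pvIndentN ("auto const " ++ p.1 ++ "{optional_apply(aggregation_step_" ++ agg ++ ",\n") 1
      let s := s ++ pvIndentN ("aggregate." ++ p.1 ++ ", sample." ++ p.1 ++ ")};\n") 2
      if agg = "mean" then
        s ++ pvIndentN ("auto const " ++ p.1 ++ "_count{state." ++ p.1 ++ "_count + \n") 1
          ++ pvIndentN ("(sample." ++ p.1 ++ ".has_value() ? 1u : 0u)};\n") 2
      else s) s0
    = s0 ++ PySem.Str.join "" (ps.map pvDchunk) := by
  induction ps generalizing s0 with
  | nil => simp [pvSJ_nil]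
  | cons p ps ih =>
    simp only [List.foldl_cons, List.map_cons, pvSJ_cons, ih]
    by_cases h : (PySem.Dict.ofList p.2).getD "aggregate" "" = "mean" <;>
      simp [pvDchunk, pvAgg, h, pvIndentN_one, pvIndentN_two, String.append_assoc]

-- A's second loop accumulates exactly the joined field names
theorem pvA_loop2 (ps : List (String × List (String × String))) (s0 : String) :
    ps.foldl (fun s p => s ++ pvIndentN (p.1 ++ ",\n") 3) s0
    = s0 ++ PySem.Str.join "" (ps.map pvFchunk) := by
  induction ps generalizing s0 with
  | nil => simp [pvSJ_nil]
  | cons p ps ih =>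
    simp only [List.foldl_cons, List.map_cons, pvSJ_cons, ih]
    simp [pvFchunk, pvIndentN_three, String.append_assoc]

-- A's third loop accumulates exactly the joined count names of the "mean" fields
theorem pvA_loop3 (ps : List (String × List (String × String))) (s0 : String) :
    ps.foldl (fun s p =>
      if (PySem.Dict.ofList p.2).getD "aggregate" "" = "mean" then s ++ pvIndentN (p.1 ++ "_count,\n") 3
      else s) s0
    = s0 ++ PySem.Str.join "" ((ps.filter (fun p => pvAgg p = "mean")).map pvCchunk) := by
  induction ps generalizing s0 with
  | nil => simp [pvSJ_nil]
  | cons p ps ih =>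
    simp only [List.foldl_cons, ih]
    by_cases h : (PySem.Dict.ofList p.2).getD "aggregate" "" = "mean" <;>
      simp [h, pvAgg, pvSJ_cons, pvCchunk, pvIndentN_three, String.append_assoc]

-- B's single scan fills the three buffers with exactly those chunk lists
theorem pvB_loop (ps : List (String × List (String × String)))
    (a b c : List String) :
    ps.foldl (fun (acc : List String × List String × List String) p =>
      let agg := (PySem.Dict.ofList p.2).getD "aggregate" ""
      let d := pvTW ("auto const " ++ p.1 ++ "{optional_apply(aggregation_step_" ++ agg ++ ",\n") "  "
      let d := d ++ pvTW ("aggregate." ++ p.1 ++ ", sample." ++ p.1 ++ ")};\n") "    "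
      let d := if agg = "mean" then
          d ++ pvTW ("auto const " ++ p.1 ++ "_count{state." ++ p.1 ++ "_count + \n") "  "
            ++ pvTW ("(sample." ++ p.1 ++ ".has_value() ? 1u : 0u)};\n") "    "
        else d
      (acc.1 ++ [d],
       acc.2.1 ++ [pvTW (p.1 ++ ",\n") "      "],
       if agg = "mean" then acc.2.2 ++ [pvTW (p.1 ++ "_count,\n") "      "] else acc.2.2))
      (a, b, c)
    = (a ++ ps.map pvDchunk, b ++ ps.map pvFchunk,
       c ++ (ps.filter (fun p => pvAgg p = "mean")).map pvCchunk) := by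
  induction ps generalizing a b c with
  | nil => simp
  | cons p ps ih =>
    by_cases h : (PySem.Dict.ofList p.2).getD "aggregate" "" = "mean" <;>
      simp [ih, h, pvAgg, pvDchunk, pvFchunk, pvCchunk]

-- ===== VERDICT (by name: the statement is the Claim_ definition above) =====
theorem snippet_aggregation_step_spec : Claim_equal_snippet_aggregation_step := by
  intro sensor_name sensor_params _ _
  unfold Spec_snippet_aggregation_step
  unfold snippet_aggregation_step snippet_aggregation_step_alt
  simp only [pvA_loop1, pvA_loop2, pvA_loop3, pvB_loop]
  simp [pvIndentN_one, pvIndentN_two, pvIndentN_three, String.append_assoc]
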